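-- pv_equiv track=rewrite | github.com/vaibhav-jain-dev/learning-algo | problems/200-must-solve/arrays/10-monotonic-array/similar/02-minimum-removals-monotonic/python_code.py | min_removals_optimized
-- ===== SOURCE A (Python) =====
-- from typing import List
-- import bisect
--
-- def min_removals_optimized(array: List[int]) -> int:
--     """
--     Optimized solution using binary search (patience sorting).
--
--     For LNDS: Use bisect_right for non-decreasing (allows equals)
--     For LNIS: Negate values and use same technique
--     """
--     if len(array) <= 1:
--         return 0
--
--     def longest_non_decreasing(arr: List[int]) -> int:
--         """Find LNDS using binary search."""
--         tails = []
--         for num in arr: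
--             # bisect_right for non-decreasing (allows equals)
--             pos = bisect.bisect_right(tails, num)
--             if pos == len(tails):
--                 tails.append(num)
--             else:
--                 tails[pos] = num
--         return len(tails)
--
--     def longest_non_increasing(arr: List[int]) -> int:
--         """Find LNIS by negating and finding LNDS."""
--         return longest_non_decreasing([-x for x in arr])
--
--     lnds = longest_non_decreasing(array)
--     lnis = longest_non_increasing(array)
--
--     return len(array) - max(lnds, lnis)
-- ===== SOURCE B (Python) =====
-- from typing import List
--
-- def min_removals_optimized(array: List[int]) -> int:
--     """O(n^2) DP re-implementation: dp pairs (value, length of longest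
--     non-decreasing subsequence ending at that value)."""
--
--     def longest_non_decreasing(arr: List[int]) -> int:
--         dp = []  # list of (value, LNDS-length ending there)
--         for num in arr:
--             best = 0
--             for v, l in dp:
--                 if v <= num and l > best:
--                     best = l
--             dp.append((num, best + 1))
--         return max((l for _, l in dp), default=0)
--
--     def longest_non_increasing(arr: List[int]) -> int:
--         return longest_non_decreasing([-x for x in arr])
--
--     lnds = longest_non_decreasing(array)
--     lnis = longest_non_increasing(array)
--     return len(array) - max(lnds, lnis)
-- ===== Notes on version B (the rewrite author's own statement) =====
-- stated objective: alternative
-- what changed: Replaces the binary-search patience-sorting tails array with a quadratic dynamic program keeping (value, LNDS-length-ending-here) pairs and taking the max, dropping the redundant len<=1 guard.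
import Mathlib
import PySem

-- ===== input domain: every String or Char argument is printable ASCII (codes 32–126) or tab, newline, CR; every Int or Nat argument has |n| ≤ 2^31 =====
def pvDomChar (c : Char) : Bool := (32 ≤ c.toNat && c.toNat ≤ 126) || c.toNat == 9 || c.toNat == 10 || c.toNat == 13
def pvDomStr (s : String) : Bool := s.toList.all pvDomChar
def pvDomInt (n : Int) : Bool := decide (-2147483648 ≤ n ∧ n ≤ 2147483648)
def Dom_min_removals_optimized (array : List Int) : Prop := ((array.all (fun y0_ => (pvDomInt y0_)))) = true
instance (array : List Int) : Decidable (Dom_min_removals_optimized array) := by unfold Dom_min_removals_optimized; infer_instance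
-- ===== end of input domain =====

-- B: quadratic DP over (value, LNDS-length-ending-here) pairs instead of A's patience-sorting
-- tails array with binary search; same return value (alternative algorithm, not faster).


-- ===== PORT A =====
-- bisect.bisect_right: insertion point after existing entries ≤ x; exact on sorted lists
-- (A only ever calls it on the sorted `tails`).
def pyBisectRight : List Int → Int → Nat
  | [], _ => 0
  | t :: ts, x => if t ≤ x then pyBisectRight ts x + 1 else 0

-- one iteration of A's inner loop over `tails`
def stepA (tails : List Int) (num : Int) : List Int :=
  let pos := pyBisectRight tails num
  if pos = tails.length then tails ++ [num] else tails.set pos num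

-- A's helper longest_non_decreasing (returns len(tails))
def lndsA (arr : List Int) : Int :=
  ((arr.foldl stepA []).length : Int)

def min_removals_optimized (array : List Int) : Int :=
  if array.length ≤ 1 then 0
  else
    let lnds := lndsA array
    let lnis := lndsA (array.map (fun x => -x))   -- longest_non_increasing: negate then LNDS
    (array.length : Int) - max lnds lnis

-- ===== PORT B =====
-- inner loop of B: best = max length among dp entries with value ≤ num (0 if none)
def bestB (dp : List (Int × Int)) (num : Int) : Int :=
  dp.foldl (fun b p => if p.1 ≤ num ∧ p.2 > b then p.2 else b) 0

-- one iteration of B's outer loop: dp.append((num, best + 1))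
def stepB (dp : List (Int × Int)) (num : Int) : List (Int × Int) :=
  dp ++ [(num, bestB dp num + 1)]

-- max((l for _, l in dp), default=0)
def maxLenB (dp : List (Int × Int)) : Int :=
  dp.foldl (fun m p => max m p.2) 0

-- B's helper longest_non_decreasing (quadratic DP)
def lndsB (arr : List Int) : Int :=
  maxLenB (arr.foldl stepB [])

def min_removals_optimized_alt (array : List Int) : Int :=
  let lnds := lndsB array
  let lnis := lndsB (array.map (fun x => -x))
  (array.length : Int) - max lnds lnis

-- ===== PRECONDITION & SPEC =====
def Spec_min_removals_optimized (array : List Int) (out : Int) : Prop := out = min_removals_optimized_alt array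
instance (array : List Int) (out : Int) : Decidable (Spec_min_removals_optimized array out) := by unfold Spec_min_removals_optimized; infer_instance

-- ===== CLAIM (what is proved, stated in full; the proofs are below) =====
def Claim_equal_min_removals_optimized : Prop := ∀ (array : List Int), Dom_min_removals_optimized array → Spec_min_removals_optimized array (min_removals_optimized array)

-- ===== LEMMAS AND PROOFS =====

/-- Invariant tying A's `tails` to B's `dp` after processing the same prefix:
`tails` is non-decreasing, every length `k+1` (k < |tails|) is witnessed in `dp`
by an entry whose value is ≤ tails[k], and every dp entry `(v, l)` has
`l = k+1` for some `k < |tails|` with `tails[k] ≤ v`. -/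
def InvAB (tails : List Int) (dp : List (Int × Int)) : Prop :=
  (∀ i j, (hi : i < tails.length) → (hj : j < tails.length) → i ≤ j → tails[i] ≤ tails[j]) ∧
  (∀ k, (hk : k < tails.length) → ∃ p ∈ dp, ((k : Int) + 1 ≤ p.2 ∧ p.1 ≤ tails[k])) ∧
  (∀ p ∈ dp, ∃ k, ∃ hk : k < tails.length, p.2 = (k : Int) + 1 ∧ tails[k] ≤ p.1)

theorem bisect_le_length (l : List Int) (x : Int) : pyBisectRight l x ≤ l.length := by
  induction l with
  | nil => simp [pyBisectRight]
  | cons t ts ih =>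
    simp only [pyBisectRight, List.length_cons]
    split <;> omega

theorem bisect_lt_le (l : List Int) (x : Int) (i : Nat) (hi : i < l.length)
    (h : i < pyBisectRight l x) : l[i] ≤ x := by
  induction l generalizing i with
  | nil => simp at hi
  | cons t ts ih =>
    simp only [pyBisectRight] at h
    by_cases ht : t ≤ x
    · simp only [if_pos ht] at h
      cases i with
      | zero => simpa using ht
      | succ i => simpa using ih i (by simpa using hi) (by omega)
    · simp [if_neg ht] at h

theorem bisect_gt_getD (l : List Int) (x : Int) (hp : pyBisectRight l x < l.length) :
    x < l.getD (pyBisectRight l x) 0 := by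
  induction l with
  | nil => simp at hp
  | cons t ts ih =>
    by_cases ht : t ≤ x
    · have he : pyBisectRight (t :: ts) x = pyBisectRight ts x + 1 := by
        simp [pyBisectRight, ht]
      rw [he] at hp ⊢
      simpa using ih (by simpa using hp)
    · have he : pyBisectRight (t :: ts) x = 0 := by simp [pyBisectRight, ht]
      rw [he]
      simpa using lt_of_not_ge ht

theorem bisect_gt (l : List Int) (x : Int) (hp : pyBisectRight l x < l.length) :
    x < l[pyBisectRight l x] := by
  have h := bisect_gt_getD l x hp
  rwa [List.getD_eq_getElem l 0 hp] at h

-- properties of B's inner fold (generalized over the accumulator)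
theorem bestB_fold_ge_init (dp : List (Int × Int)) (num b : Int) :
    b ≤ dp.foldl (fun b p => if p.1 ≤ num ∧ p.2 > b then p.2 else b) b := by
  induction dp generalizing b with
  | nil => simp
  | cons q dp ih =>
    simp only [List.foldl_cons]
    refine le_trans ?_ (ih _)
    split <;> omega

theorem bestB_fold_ge_mem (dp : List (Int × Int)) (num b : Int) (p : Int × Int)
    (hp : p ∈ dp) (hv : p.1 ≤ num) :
    p.2 ≤ dp.foldl (fun b p => if p.1 ≤ num ∧ p.2 > b then p.2 else b) b := by
  induction dp generalizing b with
  | nil => simp at hp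
  | cons q dp ih =>
    simp only [List.foldl_cons]
    rcases List.mem_cons.mp hp with h | h
    · subst h
      refine le_trans ?_ (bestB_fold_ge_init dp num _)
      split <;> omega
    · exact ih _ h

theorem bestB_fold_cases (dp : List (Int × Int)) (num b : Int) :
    dp.foldl (fun b p => if p.1 ≤ num ∧ p.2 > b then p.2 else b) b = b ∨
      ∃ p ∈ dp, p.1 ≤ num ∧
        dp.foldl (fun b p => if p.1 ≤ num ∧ p.2 > b then p.2 else b) b = p.2 := by
  induction dp generalizing b with
  | nil => simp
  | cons q dp ih =>
    simp only [List.foldl_cons]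
    by_cases hq : q.1 ≤ num ∧ q.2 > b
    · rw [if_pos hq]
      rcases ih q.2 with h | ⟨p, hp, hv, h⟩
      · exact Or.inr ⟨q, List.mem_cons_self, hq.1, h⟩
      · exact Or.inr ⟨p, List.mem_cons_of_mem _ hp, hv, h⟩
    · rw [if_neg hq]
      rcases ih b with h | ⟨p, hp, hv, h⟩
      · exact Or.inl h
      · exact Or.inr ⟨p, List.mem_cons_of_mem _ hp, hv, h⟩

/-- Under the invariant, B's inner scan computes exactly A's bisect position. -/
theorem best_eq_pos (tails : List Int) (dp : List (Int × Int)) (num : Int)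
    (hinv : InvAB tails dp) : bestB dp num = (pyBisectRight tails num : Int) := by
  obtain ⟨hmono, hwit, hmem⟩ := hinv
  have hposlen := bisect_le_length tails num
  have hub : bestB dp num ≤ (pyBisectRight tails num : Int) := by
    rcases bestB_fold_cases dp num 0 with h | ⟨p, hp, hv, h⟩
    · unfold bestB; rw [h]; positivity
    · unfold bestB; rw [h]
      obtain ⟨k, hk, hl, htk⟩ := hmem p hp
      rw [hl]
      by_cases hkp : k < pyBisectRight tails num
      · omega
      · exfalso
        have h1 : pyBisectRight tails num < tails.length := by omega
        have h2 := bisect_gt tails num h1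
        have h3 := hmono (pyBisectRight tails num) k h1 hk (by omega)
        omega
  have hlb : (pyBisectRight tails num : Int) ≤ bestB dp num := by
    rcases Nat.eq_zero_or_pos (pyBisectRight tails num) with h0 | h0
    · rw [h0]
      simpa using bestB_fold_ge_init dp num 0
    · have hm : pyBisectRight tails num - 1 < tails.length := by omega
      obtain ⟨p, hp, hl, hv⟩ := hwit (pyBisectRight tails num - 1) hm
      have hvn : p.1 ≤ num :=
        le_trans hv (bisect_lt_le tails num _ hm (by omega))
      have := bestB_fold_ge_mem dp num 0 p hp hvn
      unfold bestB
      omega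
  omega

/-- The invariant is preserved by one step of both loops. -/
theorem step_inv (tails : List Int) (dp : List (Int × Int)) (num : Int)
    (hinv : InvAB tails dp) : InvAB (stepA tails num) (stepB dp num) := by
  obtain ⟨hmono, hwit, hmem⟩ := hinv
  have hbest := best_eq_pos tails dp num ⟨hmono, hwit, hmem⟩
  set pos := pyBisectRight tails num with hposdef
  have hposlen : pos ≤ tails.length := bisect_le_length tails num
  have hsB : stepB dp num = dp ++ [(num, (pos : Int) + 1)] := by
    simp [stepB, hbest]
  by_cases hcase : pos = tails.length
  · -- append case
    have hsA : stepA tails num = tails ++ [num] := by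
      simp [stepA, ← hposdef, hcase]
    rw [hsA, hsB]
    have hle : ∀ i, (hi : i < tails.length) → tails[i] ≤ num := fun i hi =>
      bisect_lt_le tails num i hi (by omega)
    have htop : (tails ++ [num])[tails.length]'(by simp) = num := by simp
    refine ⟨?_, ?_, ?_⟩
    · intro i j hi hj hij
      simp only [List.length_append, List.length_cons, List.length_nil] at hi hj
      by_cases hjl : j < tails.length
      · have hil : i < tails.length := by omega
        rw [List.getElem_append_left hil, List.getElem_append_left hjl]
        exact hmono i j hil hjl hij
      · have hj' : j = tails.length := by omega
        subst hj'
        rw [htop]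
        by_cases hil : i < tails.length
        · rw [List.getElem_append_left hil]; exact hle i hil
        · have : i = tails.length := by omega
          subst this
          rw [htop]
    · intro k hk
      simp only [List.length_append, List.length_cons, List.length_nil] at hk
      by_cases hkl : k < tails.length
      · obtain ⟨p, hp, h1, h2⟩ := hwit k hkl
        exact ⟨p, List.mem_append_left _ hp, h1, by
          rwa [List.getElem_append_left hkl]⟩
      · have hk' : k = tails.length := by omega
        subst hk'
        refine ⟨(num, (pos : Int) + 1), List.mem_append_right _ (by simp), by simp [hcase], ?_⟩
        rw [htop]
    · intro p hp
      rcases List.mem_append.mp hp with h | h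
      · obtain ⟨k, hk, h1, h2⟩ := hmem p h
        exact ⟨k, by simp; omega, h1, by rwa [List.getElem_append_left hk]⟩
      · simp only [List.mem_singleton] at h
        subst h
        refine ⟨tails.length, by simp, by simp [hcase], ?_⟩
        rw [htop]
  · -- set case
    have hposlt : pos < tails.length := by omega
    have hsA : stepA tails num = tails.set pos num := by
      simp [stepA, ← hposdef, hcase]
    have hgt : num < tails[pos] := bisect_gt tails num hposlt
    have hle : ∀ i, i < pos → (hi : i < tails.length) → tails[i] ≤ num := fun i hip hi =>
      bisect_lt_le tails num i hi hip
    have hlen : (tails.set pos num).length = tails.length := by simp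
    have hget : ∀ i, (hi : i < tails.length) →
        (tails.set pos num)[i]'(by omega) = if i = pos then num else tails[i] := by
      intro i hi
      by_cases hip : i = pos
      · subst hip; simp [List.getElem_set_self]
      · rw [List.getElem_set_ne (by omega : pos ≠ i), if_neg hip]
    rw [hsA, hsB]
    refine ⟨?_, ?_, ?_⟩
    · intro i j hi hj hij
      rw [hlen] at hi hj
      rw [hget i hi, hget j hj]
      by_cases hip : i = pos <;> by_cases hjp : j = pos
      · simp [hip, hjp]
      · simp only [if_pos hip, if_neg hjp]
        subst hip
        exact le_trans (le_of_lt hgt) (hmono pos j hi hj hij)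
      · simp only [if_neg hip, if_pos hjp]
        subst hjp
        exact hle i (by omega) hi
      · simp only [if_neg hip, if_neg hjp]
        exact hmono i j hi hj hij
    · intro k hk
      rw [hlen] at hk
      rw [hget k hk]
      by_cases hkp : k = pos
      · subst hkp
        exact ⟨(num, (pos : Int) + 1), List.mem_append_right _ (by simp), by simp, by simp⟩
      · obtain ⟨p, hp, h1, h2⟩ := hwit k hk
        exact ⟨p, List.mem_append_left _ hp, h1, by simp [hkp, h2]⟩
    · intro p hp
      rcases List.mem_append.mp hp with h | h
      · obtain ⟨k, hk, h1, h2⟩ := hmem p h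
        refine ⟨k, by omega, h1, ?_⟩
        rw [hget k hk]
        by_cases hkp : k = pos
        · subst hkp
          simp only [if_true]
          exact le_trans (le_of_lt hgt) h2
        · simpa [hkp] using h2
      · simp only [List.mem_singleton] at h
        subst h
        refine ⟨pos, by omega, by simp, ?_⟩
        rw [hget pos hposlt]
        simp

/-- The invariant holds after folding both loops over any list, from invariant states. -/
theorem fold_inv (arr : List Int) (tails : List Int) (dp : List (Int × Int))
    (hinv : InvAB tails dp) : InvAB (arr.foldl stepA tails) (arr.foldl stepB dp) := by
  induction arr generalizing tails dp with
  | nil => simpa using hinv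
  | cons a arr ih =>
    simp only [List.foldl_cons]
    exact ih _ _ (step_inv tails dp a hinv)

theorem inv_nil : InvAB [] [] :=
  ⟨fun i j hi hj hij => by simp at hi,
   fun k hk => by simp at hk,
   fun p hp => by simp at hp⟩

-- fold-max properties for maxLenB
theorem maxfold_ge_init (dp : List (Int × Int)) (b : Int) :
    b ≤ dp.foldl (fun m p => max m p.2) b := by
  induction dp generalizing b with
  | nil => simp
  | cons q dp ih => exact le_trans (le_max_left _ _) (ih _)

theorem maxfold_ge_mem (dp : List (Int × Int)) (b : Int) (p : Int × Int) (hp : p ∈ dp) :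
    p.2 ≤ dp.foldl (fun m p => max m p.2) b := by
  induction dp generalizing b with
  | nil => simp at hp
  | cons q dp ih =>
    rcases List.mem_cons.mp hp with h | h
    · subst h
      exact le_trans (le_max_right _ _) (maxfold_ge_init dp _)
    · exact ih _ h

theorem maxfold_le (dp : List (Int × Int)) (b c : Int) (hb : b ≤ c)
    (h : ∀ p ∈ dp, p.2 ≤ c) : dp.foldl (fun m p => max m p.2) b ≤ c := by
  induction dp generalizing b with
  | nil => simpa using hb
  | cons q dp ih =>
    simp only [List.foldl_cons]
    exact ih _ (max_le hb (h q List.mem_cons_self)) fun p hp => h p (List.mem_cons_of_mem _ hp)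

/-- Under the invariant, B's max-of-lengths equals A's tails length. -/
theorem maxLen_eq (tails : List Int) (dp : List (Int × Int)) (hinv : InvAB tails dp) :
    maxLenB dp = (tails.length : Int) := by
  obtain ⟨hmono, hwit, hmem⟩ := hinv
  have hub : maxLenB dp ≤ (tails.length : Int) := by
    refine maxfold_le dp 0 _ (by positivity) fun p hp => ?_
    obtain ⟨k, hk, h1, _⟩ := hmem p hp
    omega
  have hlb : (tails.length : Int) ≤ maxLenB dp := by
    rcases Nat.eq_zero_or_pos tails.length with h0 | h0
    · rw [h0]
      simpa [maxLenB] using maxfold_ge_init dp 0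
    · obtain ⟨p, hp, h1, _⟩ := hwit (tails.length - 1) (by omega)
      have := maxfold_ge_mem dp 0 p hp
      unfold maxLenB
      omega
  omega

/-- The two LNDS helpers agree on every list. -/
theorem lnds_eq (arr : List Int) : lndsA arr = lndsB arr := by
  have h := fold_inv arr [] [] inv_nil
  unfold lndsA lndsB
  exact (maxLen_eq _ _ h).symm

theorem lndsA_singleton (x : Int) : lndsA [x] = 1 := by
  simp [lndsA, stepA, pyBisectRight]

-- ===== VERDICT (by name: the statement is the Claim_ definition above) =====
theorem min_removals_optimized_spec : Claim_equal_min_removals_optimized := by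
  intro array _
  unfold Spec_min_removals_optimized min_removals_optimized min_removals_optimized_alt
  rw [← lnds_eq, ← lnds_eq]
  by_cases h : array.length ≤ 1
  · rw [if_pos h]
    interval_cases harr : array.length
    · -- length 0
      have : array = [] := List.eq_nil_of_length_eq_zero harr
      subst this
      simp [lndsA]
    · -- length 1
      obtain ⟨x, hx⟩ : ∃ x, array = [x] := by
        match array, harr with
        | [x], _ => exact ⟨x, rfl⟩
      subst hx
      simp [lndsA_singleton]
  · rw [if_neg h]
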